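-- pv_equiv track=rewrite | github.com/Zeydel/Everybody-Codes | The Kingdom of Algorithmia/Quest20/Quest20_part2.py | prune_routes
-- ===== SOURCE A (Python) =====
-- def prune_routes(routes):
--
--     for route1 in list(routes):
--
--         r1_time, r1_alt, r1_startdir, r1_enddir = route1
--
--         for route2 in list(routes):
--
--             r2_time, r2_alt, r2_startdir, r2_enddir = route2
--
--             if r1_startdir != r2_startdir or r1_enddir != r2_enddir:
--                 continue
--
--             if r1_time < r2_time and r1_alt > r2_alt:
--                 routes.remove(route2)
--
--     return routes
-- ===== SOURCE B (Python) =====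
-- def prune_routes(routes):
--     # Group (time, alt) pairs by direction pair, then per group sort by (time, alt)
--     # and sweep with a running maximum altitude: an element is dominated exactly when
--     # the running max (over strictly earlier times, thanks to the sort order) exceeds
--     # its altitude.  Mutates routes in place (like the original) and returns it.
--     groups = {}
--     for t, a, sd, ed in routes:
--         groups.setdefault((sd, ed), []).append((t, a))
--     dominated = set()
--     for (sd, ed), members in groups.items():
--         best = None
--         for t, a in sorted(members):
--             if best is not None and best > a:
--                 dominated.add((t, a, sd, ed))
--             if best is None or a > best:
--                 best = a
--     routes[:] = [r for r in routes if r not in dominated]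
--     return routes
-- ===== Notes on version B (the rewrite author's own statement) =====
-- stated objective: faster
-- what changed: Replaces the all-pairs remove-while-iterating loop by grouping routes by direction pair in a dict, sorting each group by (time, altitude) and marking dominated routes with one running-max-altitude sweep, then filtering once.
import Mathlib
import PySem

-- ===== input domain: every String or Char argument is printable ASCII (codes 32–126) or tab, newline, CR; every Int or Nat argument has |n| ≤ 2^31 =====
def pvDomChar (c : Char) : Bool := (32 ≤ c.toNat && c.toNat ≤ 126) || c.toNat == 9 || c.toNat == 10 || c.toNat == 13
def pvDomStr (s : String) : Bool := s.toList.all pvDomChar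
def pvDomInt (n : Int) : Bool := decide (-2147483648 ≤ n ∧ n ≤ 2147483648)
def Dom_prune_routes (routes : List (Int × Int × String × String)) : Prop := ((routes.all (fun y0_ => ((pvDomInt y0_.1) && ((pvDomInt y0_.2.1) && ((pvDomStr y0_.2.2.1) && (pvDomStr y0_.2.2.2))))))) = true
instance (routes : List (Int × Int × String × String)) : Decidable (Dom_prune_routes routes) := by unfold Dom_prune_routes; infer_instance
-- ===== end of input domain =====

-- B replaces A's quadratic remove-while-iterating double loop by a per-direction-pair
-- grouping dict plus a sort and one running-max-altitude sweep per group (objective: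
-- faster).  Both A and B mutate `routes` in place and return it; the equivalence proved
-- here is about the returned value (which is also the final content of the list).

-- ===== PORT A =====
-- one step of the inner 'for route2 in list(routes)' loop; acc is the mutating list
def pruneInnerStep (route1 : Int × Int × String × String)
    (acc : List (Int × Int × String × String)) (route2 : Int × Int × String × String) :
    List (Int × Int × String × String) :=
  if route1.2.2.1 != route2.2.2.1 || route1.2.2.2 != route2.2.2.2 then acc
  else if route1.1 < route2.1 && route1.2.1 > route2.2.1 then
    (PySem.List.remove? acc route2).getD acc
  else acc

-- inner loop: iterate over a snapshot (= the current list at that point) while removing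
def pruneInner (route1 : Int × Int × String × String)
    (rs : List (Int × Int × String × String)) : List (Int × Int × String × String) :=
  rs.foldl (pruneInnerStep route1) rs

def prune_routes (routes : List (Int × Int × String × String)) : List (Int × Int × String × String) :=
  routes.foldl (fun rs route1 => pruneInner route1 rs) routes

-- ===== PORT B =====
-- groups.setdefault((sd, ed), []).append((t, a))  for each route
def altGroups (routes : List (Int × Int × String × String)) :
    PySem.Dict (String × String) (List (Int × Int)) :=
  routes.foldl (fun d r => d.modify (r.2.2.1, r.2.2.2) [] (fun v => v ++ [(r.1, r.2.1)]))
    PySem.Dict.empty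

-- one step of the sweep over a sorted group: state = (dominated set, running max altitude)
def altScanStep (c : String × String)
    (st : PySem.Set (Int × Int × String × String) × Option Int) (p : Int × Int) :
    PySem.Set (Int × Int × String × String) × Option Int :=
  let D := match st.2 with
    | some b => if b > p.2 then PySem.Set.add st.1 (p.1, p.2, c.1, c.2) else st.1
    | none => st.1
  let best := match st.2 with
    | none => some p.2
    | some b => if p.2 > b then some p.2 else some b
  (D, best)

-- 'for t, a in sorted(members): ...' for the group with direction pair c
def altScan (c : String × String) (members : List (Int × Int))
    (D : PySem.Set (Int × Int × String × String)) : PySem.Set (Int × Int × String × String) :=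
  ((PySem.List.sorted2 members (fun p => p.1) (fun p => p.2)).foldl (altScanStep c) (D, none)).1

def prune_routes_alt (routes : List (Int × Int × String × String)) : List (Int × Int × String × String) :=
  let groups := altGroups routes
  let dominated := groups.items.foldl (fun D it => altScan it.1 it.2 D) PySem.Set.empty
  routes.filter (fun r => !(PySem.Set.contains dominated r))

-- ===== PRECONDITION & SPEC =====
def Spec_prune_routes (routes : List (Int × Int × String × String)) (out : List (Int × Int × String × String)) : Prop := out = prune_routes_alt routes
instance (routes : List (Int × Int × String × String)) (out : List (Int × Int × String × String)) : Decidable (Spec_prune_routes routes out) := by unfold Spec_prune_routes; infer_instance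

-- ===== CLAIM (what is proved, stated in full; the proofs are below) =====
def Claim_equal_prune_routes : Prop := ∀ (routes : List (Int × Int × String × String)), Dom_prune_routes routes → Spec_prune_routes routes (prune_routes routes)

-- ===== LEMMAS AND PROOFS =====

-- 'u dominates v': same direction pair, strictly smaller time, strictly larger altitude
def domB (u v : Int × Int × String × String) : Bool :=
  (u.2.2.1 == v.2.2.1) && (u.2.2.2 == v.2.2.2) && (u.1 < v.1) && (u.2.1 > v.2.1)

-- the common characterisation both ports are reduced to
def prunedSpec (routes : List (Int × Int × String × String)) : List (Int × Int × String × String) :=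
  routes.filter (fun v => routes.all (fun u => !domB u v))

-- ---- A side: the remove loop is a filter ----

theorem remove?_append_not_mem {α : Type} [BEq α] [LawfulBEq α] (v : α) :
    ∀ (acc l : List α), v ∉ acc → PySem.List.remove? (acc ++ v :: l) v = some (acc ++ l) := by
  intro acc
  induction acc with
  | nil => intro l _; simp [PySem.List.remove?_cons_self]
  | cons a acc ih =>
    intro l h
    have hav : a ≠ v := fun e => h (by simp [e])
    rw [List.cons_append, PySem.List.remove?_cons_of_ne _ hav,
      ih l (fun hv => h (List.mem_cons_of_mem _ hv))]
    rfl

theorem pruneInnerStep_eq (r1 v : Int × Int × String × String)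
    (acc : List (Int × Int × String × String)) :
    pruneInnerStep r1 acc v = if domB r1 v then (PySem.List.remove? acc v).getD acc else acc := by
  unfold pruneInnerStep domB
  by_cases h1 : r1.2.2.1 = v.2.2.1 <;> by_cases h2 : r1.2.2.2 = v.2.2.2 <;>
    by_cases h3 : r1.1 < v.1 <;> by_cases h4 : r1.2.1 > v.2.1 <;>
    simp [h1, h2, h3, h4]

theorem pruneInner_gen (r1 : Int × Int × String × String) :
    ∀ (l acc : List (Int × Int × String × String)), (∀ v ∈ acc, domB r1 v = false) →
      l.foldl (pruneInnerStep r1) (acc ++ l) = acc ++ l.filter (fun v => !domB r1 v) := by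
  intro l
  induction l with
  | nil => intro acc _; simp
  | cons v l ih =>
    intro acc hacc
    rw [List.foldl_cons, pruneInnerStep_eq]
    by_cases hd : domB r1 v = true
    · have hv : v ∉ acc := fun hm => by simp [hacc v hm] at hd
      rw [if_pos hd, remove?_append_not_mem v acc l hv, Option.getD_some, ih acc hacc,
        List.filter_cons]
      simp [hd]
    · have hd' : domB r1 v = false := by simpa using hd
      rw [if_neg hd]
      have : acc ++ v :: l = (acc ++ [v]) ++ l := by simp
      rw [this, ih (acc ++ [v]) ?_, List.filter_cons]
      · simp [hd']
      · intro w hw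
        rcases List.mem_append.1 hw with h | h
        · exact hacc w h
        · simp at h; subst h; exact hd'

theorem pruneInner_eq_filter (r1 : Int × Int × String × String)
    (rs : List (Int × Int × String × String)) :
    pruneInner r1 rs = rs.filter (fun v => !domB r1 v) := by
  have := pruneInner_gen r1 rs [] (by simp)
  simpa [pruneInner] using this

theorem foldl_filter_all (l : List (Int × Int × String × String)) :
    ∀ (s : List (Int × Int × String × String)),
      l.foldl (fun s u => s.filter (fun v => !domB u v)) s
        = s.filter (fun v => l.all (fun u => !domB u v)) := by
  induction l with
  | nil => intro s; simp
  | cons u l ih =>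
    intro s
    rw [List.foldl_cons, ih, List.filter_filter]
    apply List.filter_congr
    intro v _
    simp [List.all_cons, Bool.and_comm]

theorem prune_routes_eq_spec (routes : List (Int × Int × String × String)) :
    prune_routes routes = prunedSpec routes := by
  unfold prune_routes prunedSpec
  have : (fun (rs : List (Int × Int × String × String)) route1 => pruneInner route1 rs)
      = fun rs u => rs.filter (fun v => !domB u v) := by
    funext rs u; exact pruneInner_eq_filter u rs
  rw [this, foldl_filter_all]

-- ---- B side: the grouped sorted sweep marks exactly the dominated routes ----

-- the strict comparison sorted2 uses on (time, alt) pairs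
def bLt (a b : Int × Int) : Bool :=
  decide (a.1 < b.1) || (!decide (b.1 < a.1) && decide (a.2 < b.2))

theorem bLt_false_iff (a b : Int × Int) :
    bLt b a = false ↔ (a.1 < b.1 ∨ (a.1 = b.1 ∧ a.2 ≤ b.2)) := by
  simp only [bLt, Bool.or_eq_false_iff, Bool.and_eq_false_iff, decide_eq_false_iff_not,
    Bool.not_eq_false', decide_eq_true_eq]
  omega

theorem bLt_asymm {x y : Int × Int} (h : bLt x y = true) : bLt y x = false := by
  simp only [bLt, Bool.or_eq_true, Bool.and_eq_true, decide_eq_true_eq,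
    Bool.not_eq_true', decide_eq_false_iff_not] at h
  simp only [bLt, Bool.or_eq_false_iff, Bool.and_eq_false_iff, decide_eq_false_iff_not,
    Bool.not_eq_false', decide_eq_true_eq]
  omega

theorem bLt_trans_false {x y z : Int × Int} (h : bLt x y = true) (h' : bLt z y = false) :
    bLt z x = false := by
  simp only [bLt, Bool.or_eq_true, Bool.and_eq_true, decide_eq_true_eq,
    Bool.not_eq_true', decide_eq_false_iff_not] at h
  simp only [bLt, Bool.or_eq_false_iff, Bool.and_eq_false_iff, decide_eq_false_iff_not,
    Bool.not_eq_false', decide_eq_true_eq] at h' ⊢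
  omega

theorem insertBy_pairwise_bLt (x : Int × Int) :
    ∀ (ys : List (Int × Int)), ys.Pairwise (fun a b => bLt b a = false) →
      (PySem.List.insertBy bLt x ys).Pairwise (fun a b => bLt b a = false) := by
  intro ys
  induction ys with
  | nil => intro _; simp [PySem.List.insertBy]
  | cons y ys ih =>
    intro h
    rw [PySem.List.insertBy]
    by_cases hb : bLt x y = true
    · rw [if_pos hb]
      refine List.Pairwise.cons ?_ h
      intro z hz
      rcases List.mem_cons.1 hz with rfl | hz'
      · exact bLt_asymm hb
      · exact bLt_trans_false hb (List.rel_of_pairwise_cons h hz')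
    · rw [if_neg hb]
      refine List.Pairwise.cons ?_ (ih h.tail)
      intro z hz
      rcases (PySem.List.mem_insertBy bLt x z ys).1 hz with rfl | hz'
      · simpa using hb
      · exact List.rel_of_pairwise_cons h hz'

theorem sorted2_eq_foldl (ms : List (Int × Int)) :
    PySem.List.sorted2 ms (fun p => p.1) (fun p => p.2)
      = ms.foldl (fun acc x => PySem.List.insertBy bLt x acc) [] := rfl

theorem sorted2_pairwise_bLt (ms : List (Int × Int)) :
    (PySem.List.sorted2 ms (fun p => p.1) (fun p => p.2)).Pairwise (fun a b => bLt b a = false) := by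
  rw [sorted2_eq_foldl]
  have gen : ∀ (l acc : List (Int × Int)), acc.Pairwise (fun a b => bLt b a = false) →
      (l.foldl (fun acc x => PySem.List.insertBy bLt x acc) acc).Pairwise
        (fun a b => bLt b a = false) := by
    intro l
    induction l with
    | nil => intro acc h; simpa using h
    | cons x l ih => intro acc h; exact ih _ (insertBy_pairwise_bLt x acc h)
  exact gen ms [] (by simp)

theorem altScan_foldl_mem (c : String × String) :
    ∀ (s done : List (Int × Int)) (D : PySem.Set (Int × Int × String × String)) (best : Option Int),
      (done ++ s).Pairwise (fun a b => bLt b a = false) →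
      (∀ q ∈ done, ∀ b, best = some b → q.2 ≤ b) →
      (∀ b, best = some b → ∃ q ∈ done, q.2 = b) →
      (best = none → done = []) →
      ∀ x, x ∈ (s.foldl (altScanStep c) (D, best)).1 ↔
        x ∈ D ∨ ∃ p ∈ s, (∃ q ∈ done ++ s, q.1 < p.1 ∧ q.2 > p.2) ∧ x = (p.1, p.2, c.1, c.2) := by
  intro s
  induction s with
  | nil => intro done D best hs hb1 hb2 hb3 x; simp
  | cons p s ih =>
    intro done D best hs hb1 hb2 hb3 x
    -- cross-order facts from sortedness
    have hcross : ∀ q ∈ done, bLt p q = false := by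
      intro q hq
      exact (List.pairwise_append.1 hs).2.2 q hq p (List.mem_cons_self ..)
    have hps : ∀ q ∈ s, bLt q p = false := by
      intro q hq
      exact List.rel_of_pairwise_cons (List.pairwise_append.1 hs).2.1 hq
    -- the dominance condition at p, in terms of the state
    have hfired : ∀ b, best = some b →
        ((b > p.2) ↔ ∃ q ∈ done ++ p :: s, q.1 < p.1 ∧ q.2 > p.2) := by
      intro b hb
      constructor
      · intro hgt
        obtain ⟨q, hq, hqe⟩ := hb2 b hb
        rcases (bLt_false_iff q p).1 (hcross q hq) with h | h
        · exact ⟨q, List.mem_append_left _ hq, h, by omega⟩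
        · exact absurd hgt (by omega)
      · rintro ⟨q, hq, hq1, hq2⟩
        rcases List.mem_append.1 hq with hq | hq
        · have := hb1 q hq b hb; omega
        · rcases List.mem_cons.1 hq with rfl | hq
          · omega
          · rcases (bLt_false_iff p q).1 (hps q hq) with h | h <;> omega
    have hnofire : best = none →
        ¬ ∃ q ∈ done ++ p :: s, q.1 < p.1 ∧ q.2 > p.2 := by
      intro hb
      rintro ⟨q, hq, hq1, hq2⟩
      rcases List.mem_append.1 hq with hq | hq
      · rw [hb3 hb] at hq; simp at hq
      · rcases List.mem_cons.1 hq with rfl | hq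
        · omega
        · rcases (bLt_false_iff p q).1 (hps q hq) with h | h <;> omega
    rw [List.foldl_cons]
    rcases best with _ | b
    · -- best = None: done = [], no element can be dominated yet
      have hdone : done = [] := hb3 rfl
      subst hdone
      have hstep : altScanStep c (D, none) p = (D, some p.2) := rfl
      rw [hstep, ih [p] D (some p.2) (by simpa using hs)
        (by intro q hq b hb; simp at hq hb; subst hq; omega)
        (by intro b hb; simp at hb; exact ⟨p, by simp, by omega⟩)
        (by simp)]
      constructor
      · rintro (hx | ⟨p', hp', hq, hx⟩)
        · exact Or.inl hx
        · exact Or.inr ⟨p', List.mem_cons_of_mem _ hp', by simpa using hq, hx⟩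
      · rintro (hx | ⟨p', hp', hq, hx⟩)
        · exact Or.inl hx
        · rcases List.mem_cons.1 hp' with rfl | hp'
          · exact absurd (by simpa using hq) (hnofire rfl)
          · exact Or.inr ⟨p', hp', by simpa using hq, hx⟩
    · -- best = some b
      have hstep : altScanStep c (D, some b) p
          = (if b > p.2 then PySem.Set.add D (p.1, p.2, c.1, c.2) else D,
             if p.2 > b then some p.2 else some b) := rfl
      rw [hstep, ih (done ++ [p]) _ _
        (by simpa using hs)
        (by
          intro q hq b' hb'
          split at hb' <;> rename_i hcmp <;> simp at hb' <;> subst hb' <;>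
            rcases List.mem_append.1 hq with hq | hq
          · exact le_of_lt (lt_of_le_of_lt (hb1 q hq b rfl) hcmp)
          · simp at hq; subst hq; omega
          · exact hb1 q hq b rfl
          · simp at hq; subst hq; omega)
        (by
          intro b' hb'
          split at hb' <;> rename_i hcmp <;> simp at hb' <;> subst hb'
          · exact ⟨p, by simp, rfl⟩
          · obtain ⟨q, hq, hqe⟩ := hb2 b rfl
            exact ⟨q, List.mem_append_left _ hq, hqe⟩)
        (by split <;> simp)]
      have hDmem : (x ∈ if b > p.2 then PySem.Set.add D (p.1, p.2, c.1, c.2) else D) ↔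
          x ∈ D ∨ ((∃ q ∈ done ++ p :: s, q.1 < p.1 ∧ q.2 > p.2) ∧ x = (p.1, p.2, c.1, c.2)) := by
        split <;> rename_i hcmp
        · rw [PySem.Set.mem_add]
          constructor
          · rintro (hx | rfl)
            · exact Or.inl hx
            · exact Or.inr ⟨(hfired b rfl).1 hcmp, rfl⟩
          · rintro (hx | ⟨_, rfl⟩)
            · exact Or.inl hx
            · exact Or.inr rfl
        · constructor
          · exact Or.inl
          · rintro (hx | ⟨hq, rfl⟩)
            · exact hx
            · exact absurd ((hfired b rfl).2 hq) (by omega)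
      rw [hDmem]
      have hEq : (done ++ [p]) ++ s = done ++ p :: s := by simp
      rw [hEq]
      constructor
      · rintro ((hx | ⟨hq, hx⟩) | ⟨p', hp', hq, hx⟩)
        · exact Or.inl hx
        · exact Or.inr ⟨p, List.mem_cons_self .., hq, hx⟩
        · exact Or.inr ⟨p', List.mem_cons_of_mem _ hp', hq, hx⟩
      · rintro (hx | ⟨p', hp', hq, hx⟩)
        · exact Or.inl (Or.inl hx)
        · rcases List.mem_cons.1 hp' with rfl | hp'
          · exact Or.inl (Or.inr ⟨hq, hx⟩)
          · exact Or.inr ⟨p', hp', hq, hx⟩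

theorem altScan_mem (c : String × String) (ms : List (Int × Int))
    (D : PySem.Set (Int × Int × String × String)) (x : Int × Int × String × String) :
    x ∈ altScan c ms D ↔
      x ∈ D ∨ ∃ p ∈ ms, (∃ q ∈ ms, q.1 < p.1 ∧ q.2 > p.2) ∧ x = (p.1, p.2, c.1, c.2) := by
  unfold altScan
  rw [altScan_foldl_mem c _ [] D none (by simpa using sorted2_pairwise_bLt ms)
    (by simp) (by simp) (by simp)]
  have hperm := PySem.List.sorted2_perm ms (fun p : Int × Int => p.1) (fun p : Int × Int => p.2) false
  simp only [List.nil_append]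
  constructor
  · rintro (hx | ⟨p, hp, ⟨q, hq, hq12⟩, hx⟩)
    · exact Or.inl hx
    · exact Or.inr ⟨p, hperm.mem_iff.1 hp, ⟨q, hperm.mem_iff.1 hq, hq12⟩, hx⟩
  · rintro (hx | ⟨p, hp, ⟨q, hq, hq12⟩, hx⟩)
    · exact Or.inl hx
    · exact Or.inr ⟨p, hperm.mem_iff.2 hp, ⟨q, hperm.mem_iff.2 hq, hq12⟩, hx⟩

theorem altGroups_eq_pairs (routes : List (Int × Int × String × String)) :
    altGroups routes
      = ((routes.map (fun r => ((r.2.2.1, r.2.2.2), (r.1, r.2.1)))).foldl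
          (fun d p => d.modify p.1 [] (fun v => v ++ [p.2])) PySem.Dict.empty) := by
  rw [List.foldl_map]; rfl

theorem altGroups_getD (routes : List (Int × Int × String × String)) (c : String × String) :
    (altGroups routes).getD c []
      = (routes.filter (fun r => (r.2.2.1, r.2.2.2) == c)).map (fun r => (r.1, r.2.1)) := by
  rw [altGroups_eq_pairs, PySem.Dict.getD_foldl_modify_append]
  simp [List.filter_map, Function.comp_def, List.map_map]

theorem altGroups_keys (routes : List (Int × Int × String × String)) :
    (altGroups routes).keys = PySem.Set.ofList (routes.map (fun r => (r.2.2.1, r.2.2.2))) := by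
  rw [show altGroups routes
      = routes.foldl (fun d r => d.modify ((fun r : Int × Int × String × String =>
          (r.2.2.1, r.2.2.2)) r) [] ((fun (_ : PySem.Dict (String × String) (List (Int × Int)))
          (r : Int × Int × String × String) (v : List (Int × Int)) => v ++ [(r.1, r.2.1)])
          (PySem.Dict.empty) r)) PySem.Dict.empty from rfl]
  rw [PySem.Dict.keys_foldl_modify_key]
  rfl

theorem altGroups_keys_nodup (routes : List (Int × Int × String × String)) :
    (altGroups routes).keys.Nodup := by
  rw [altGroups_keys]
  exact PySem.Set.nodup_ofList _

theorem foldl_altScan_map_mem (M : String × String → List (Int × Int)) :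
    ∀ (ks : List (String × String)) (D0 : PySem.Set (Int × Int × String × String))
      (x : Int × Int × String × String),
      x ∈ (ks.map (fun k => (k, M k))).foldl (fun D it => altScan it.1 it.2 D) D0 ↔
        x ∈ D0 ∨ ∃ k ∈ ks, ∃ p ∈ M k, (∃ q ∈ M k, q.1 < p.1 ∧ q.2 > p.2)
          ∧ x = (p.1, p.2, k.1, k.2) := by
  intro ks
  induction ks with
  | nil => intro D0 x; simp
  | cons k ks ih =>
    intro D0 x
    rw [List.map_cons, List.foldl_cons, ih, altScan_mem]
    constructor
    · rintro ((hx | h) | ⟨k', hk', h⟩)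
      · exact Or.inl hx
      · exact Or.inr ⟨k, List.mem_cons_self .., h⟩
      · exact Or.inr ⟨k', List.mem_cons_of_mem _ hk', h⟩
    · rintro (hx | ⟨k', hk', h⟩)
      · exact Or.inl (Or.inl hx)
      · rcases List.mem_cons.1 hk' with rfl | hk'
        · exact Or.inl (Or.inr h)
        · exact Or.inr ⟨k', hk', h⟩

theorem dominated_mem (routes : List (Int × Int × String × String))
    (r : Int × Int × String × String) (hr : r ∈ routes) :
    (r ∈ (altGroups routes).items.foldl (fun D it => altScan it.1 it.2 D) PySem.Set.empty)
      ↔ ∃ u ∈ routes, domB u r = true := by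
  rw [PySem.Dict.items_eq_map_keys _ (altGroups_keys_nodup routes) [],
    foldl_altScan_map_mem]
  simp only [altGroups_getD, altGroups_keys, List.mem_map, PySem.Set.mem_ofList,
    List.mem_filter, beq_iff_eq]
  constructor
  · rintro (hx | ⟨k, _, p, ⟨w, ⟨hw, hwk⟩, hwp⟩, ⟨q, ⟨u, ⟨hu, huk⟩, huq⟩, hq1, hq2⟩, hx⟩)
    · simp [PySem.Set.empty] at hx
    · refine ⟨u, hu, ?_⟩
      subst hx hwp huq
      simp only [domB, Bool.and_eq_true, beq_iff_eq, decide_eq_true_eq]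
      refine ⟨⟨⟨?_, ?_⟩, ?_⟩, ?_⟩
      · rw [show u.2.2.1 = k.1 from congrArg Prod.fst huk]
      · rw [show u.2.2.2 = k.2 from congrArg Prod.snd huk]
      · exact hq1
      · exact hq2
  · rintro ⟨u, hu, hdom⟩
    simp only [domB, Bool.and_eq_true, beq_iff_eq, decide_eq_true_eq] at hdom
    obtain ⟨⟨⟨h1, h2⟩, h3⟩, h4⟩ := hdom
    refine Or.inr ⟨(r.2.2.1, r.2.2.2), ⟨r, hr, rfl⟩,
      (r.1, r.2.1), ⟨r, ⟨hr, rfl⟩, rfl⟩,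
      ⟨(u.1, u.2.1), ⟨u, ⟨hu, by rw [h1, h2]⟩, rfl⟩, h3, h4⟩, rfl⟩

theorem prune_routes_alt_eq_spec (routes : List (Int × Int × String × String)) :
    prune_routes_alt routes = prunedSpec routes := by
  unfold prune_routes_alt prunedSpec
  apply List.filter_congr
  intro r hr
  have hiff := dominated_mem routes r hr
  by_cases hd : r ∈ (altGroups routes).items.foldl (fun D it => altScan it.1 it.2 D) PySem.Set.empty
  · obtain ⟨u, hu, hdom⟩ := hiff.1 hd
    rw [(PySem.Set.contains_iff _ _).2 hd]
    simp only [Bool.not_true]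
    symm
    rw [List.all_eq_false]
    exact ⟨u, hu, by simp [hdom]⟩
  · have hc : PySem.Set.contains
        ((altGroups routes).items.foldl (fun D it => altScan it.1 it.2 D) PySem.Set.empty) r
        = false := by
      cases h : PySem.Set.contains
        ((altGroups routes).items.foldl (fun D it => altScan it.1 it.2 D) PySem.Set.empty) r
      · rfl
      · exact absurd ((PySem.Set.contains_iff _ _).1 h) hd
    rw [hc]
    simp only [Bool.not_false]
    symm
    rw [List.all_eq_true]
    intro u hu
    cases h : domB u r with
    | false => simp
    | true => exact absurd (hiff.2 ⟨u, hu, h⟩) hd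

-- ===== VERDICT (by name: the statement is the Claim_ definition above) =====
theorem prune_routes_spec : Claim_equal_prune_routes := by
  intro routes _
  unfold Spec_prune_routes
  rw [prune_routes_eq_spec, prune_routes_alt_eq_spec]
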